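-- pv_equiv track=rewrite | github.com/danielkurniadi/100-days-leetcode | top_interviews/byte_dance/reaper_clone/program.py | count_reaper
-- ===== SOURCE A (Python) =====
-- from collections import deque
--
-- def count_reaper(n):
--     total_reaper = 1
--     queue = deque([0])
--     while queue:
--         idx = queue.popleft()
--         if idx < n-4:
--             total_reaper += min(n-idx-4, 4)
--             for i in range(idx+5, min(idx+9, n)):
--                 queue.append(i)
--     return total_reaper
-- ===== SOURCE B (Python) =====
-- def count_reaper(n):
--     # Backward O(n) dynamic programming with an O(1) sliding window:
--     # window[j] holds dp[idx+1+j], where dp[i] is the total contribution of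
--     # the subtree rooted at index i; answer is 1 + dp[0].
--     window = (0,) * 8
--     idx = n - 1
--     while idx >= 0:
--         if idx < n - 4:
--             val = min(n - idx - 4, 4) + window[4] + window[5] + window[6] + window[7]
--         else:
--             val = 0
--         window = (val,) + window[:7]
--         idx -= 1
--     return 1 + window[0]
-- ===== Notes on version B (the rewrite author's own statement) =====
-- stated objective: faster
-- what changed: Replaced the exponential BFS over the index-jump tree (every reachable index enqueued separately, visited once per path) by a backward O(n) dynamic program over subtree contributions dp[i], kept in an O(1) sliding window of 8 values.
import Mathlib
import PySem

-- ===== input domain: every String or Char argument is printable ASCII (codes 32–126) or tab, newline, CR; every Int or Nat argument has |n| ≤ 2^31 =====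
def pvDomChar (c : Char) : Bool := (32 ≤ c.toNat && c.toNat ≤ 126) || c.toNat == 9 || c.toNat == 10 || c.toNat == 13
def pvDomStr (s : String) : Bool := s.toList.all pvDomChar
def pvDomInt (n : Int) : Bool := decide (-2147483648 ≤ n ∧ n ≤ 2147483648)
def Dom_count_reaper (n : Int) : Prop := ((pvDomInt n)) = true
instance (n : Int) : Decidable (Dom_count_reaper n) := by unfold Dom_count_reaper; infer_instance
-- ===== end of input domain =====

-- B replaces A's exponential BFS over the index-jump tree by a backward O(n) DP with a sliding window; return values agree on all inputs.

-- ===== PORT A =====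
-- termination helper for the BFS queue: each popped index is replaced by at most
-- four indices whose weight 5^(n-i) sums to strictly less than the popped weight
theorem pvReaperMeasureLt (n idx : Int) (h : idx < n - 4) :
    ((PySem.List.pyRange (idx + 5) (min (idx + 9) n) 1).map (fun x => 5 ^ (n - x).toNat)).sum
      < 5 ^ (n - idx).toNat := by
  set K := (n - idx).toNat with hKdef
  have hK : 5 ≤ K := by omega
  have hb : ∀ y ∈ (PySem.List.pyRange (idx + 5) (min (idx + 9) n) 1).map
      (fun x => 5 ^ (n - x).toNat), y ≤ 5 ^ (K - 5) := by
    intro y hy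
    rcases List.mem_map.mp hy with ⟨i, hi, rfl⟩
    rw [PySem.List.mem_pyRange_one] at hi
    exact Nat.pow_le_pow_right (by norm_num) (by omega)
  have hsum := List.sum_le_card_nsmul _ _ hb
  have hlen : ((PySem.List.pyRange (idx + 5) (min (idx + 9) n) 1).map
      (fun x => 5 ^ (n - x).toNat)).length ≤ 4 := by
    simp [PySem.List.length_pyRange_one]; omega
  have h1 : 1 ≤ 5 ^ (K - 5) := Nat.one_le_pow _ _ (by norm_num)
  have hKsplit : 5 ^ K = 5 ^ (K - 5) * 3125 := by
    have : K = (K - 5) + 5 := by omega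
    rw [this, pow_add]; norm_num
  have : ((PySem.List.pyRange (idx + 5) (min (idx + 9) n) 1).map
      (fun x => 5 ^ (n - x).toNat)).sum ≤ 4 * 5 ^ (K - 5) := by
    calc _ ≤ _ := hsum
    _ ≤ 4 * 5 ^ (K - 5) := by
          simp only [smul_eq_mul]
          exact Nat.mul_le_mul_right _ hlen
  omega

-- named decrease facts for reaperLoop's termination (cited in decreasing_by)
theorem pvDecPop (n idx : Int) (rest back : List Int) (h : idx < n - 4) :
    10 * ((List.map (fun x => 5 ^ (n - x).toNat) rest).sum
        + (List.map (fun x => 5 ^ (n - x).toNat)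
            ((PySem.List.pyRange (idx + 5) (min (idx + 9) n)).reverse ++ back)).sum)
      + rest.length
      + 2 * ((PySem.List.pyRange (idx + 5) (min (idx + 9) n)).reverse ++ back).length
    < 10 * ((List.map (fun x => 5 ^ (n - x).toNat) (idx :: rest)).sum
          + (List.map (fun x => 5 ^ (n - x).toNat) back).sum)
        + (idx :: rest).length + 2 * back.length := by
  have := pvReaperMeasureLt n idx h
  have hR : ((PySem.List.pyRange (idx + 5) (min (idx + 9) n) 1).reverse.map
      (fun x => 5 ^ (n - x).toNat)).sum
      = ((PySem.List.pyRange (idx + 5) (min (idx + 9) n) 1).map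
          (fun x => 5 ^ (n - x).toNat)).sum := by
    rw [List.map_reverse, List.sum_reverse]
  have hL : ((PySem.List.pyRange (idx + 5) (min (idx + 9) n) 1).reverse).length ≤ 4 := by
    simp [PySem.List.length_pyRange_one]; omega
  simp only [List.map_append, List.sum_append, List.map_cons, List.sum_cons,
    List.length_append, List.length_cons, List.length_reverse]
  rw [hR]
  simp only [List.length_reverse] at hL
  omega

theorem pvDecSkip (n idx : Int) (rest back : List Int) :
    10 * ((List.map (fun x => 5 ^ (n - x).toNat) rest).sum
        + (List.map (fun x => 5 ^ (n - x).toNat) back).sum)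
      + rest.length + 2 * back.length
    < 10 * ((List.map (fun x => 5 ^ (n - x).toNat) (idx :: rest)).sum
          + (List.map (fun x => 5 ^ (n - x).toNat) back).sum)
        + (idx :: rest).length + 2 * back.length := by
  have : 0 < 5 ^ (n - idx).toNat := Nat.pow_pos (by norm_num)
  simp only [List.map_cons, List.sum_cons, List.length_cons]
  omega

theorem pvDecFlip (n b : Int) (bs : List Int) :
    10 * ((List.map (fun x => 5 ^ (n - x).toNat) (b :: bs).reverse).sum
        + (List.map (fun x => 5 ^ (n - x).toNat) ([] : List Int)).sum)
      + (b :: bs).reverse.length + 2 * ([] : List Int).length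
    < 10 * ((List.map (fun x => 5 ^ (n - x).toNat) ([] : List Int)).sum
          + (List.map (fun x => 5 ^ (n - x).toNat) (b :: bs)).sum)
        + ([] : List Int).length + 2 * (b :: bs).length := by
  simp only [List.map_reverse, List.sum_reverse, List.map_nil, List.sum_nil,
    List.length_nil, List.length_reverse, List.length_cons, List.map_cons,
    List.sum_cons]
  omega

-- the while loop of A: the deque, used only via popleft/append, is rendered as the
-- canonical two-list FIFO queue (popleft = head of front, refilled from the reversed
-- back; append = cons on back) so that the port evaluates without quadratic appends
def reaperLoop (n : Int) (front back : List Int) (total : Int) : Int :=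
  match front, back with
  | idx :: rest, back =>
    if idx < n - 4 then
      reaperLoop n rest
        ((PySem.List.pyRange (idx + 5) (min (idx + 9) n) 1).reverse ++ back)
        (total + min (n - idx - 4) 4)
    else
      reaperLoop n rest back total
  | [], [] => total
  | [], b :: bs => reaperLoop n ((b :: bs).reverse) [] total
termination_by 10 * ((front.map (fun x => 5 ^ (n - x).toNat)).sum
    + (back.map (fun x => 5 ^ (n - x).toNat)).sum) + front.length + 2 * back.length
decreasing_by
  · rename_i h; exact pvDecPop n idx rest back h
  · exact pvDecSkip n idx rest back
  · exact pvDecFlip n b bs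

def count_reaper (n : Int) : Int := reaperLoop n [0] [] 1

-- ===== PORT B =====
-- named decrease fact for altLoop's termination (cited in decreasing_by)
theorem pvDecAlt (idx : Int) (h : 0 ≤ idx) : (idx - 1 + 1).toNat < (idx + 1).toNat := by
  omega

-- the while loop of B: idx counts down from n-1; w is the 8-slot sliding window
-- (tuple indexing w[j] ported as pyGetD with default 0 — the window always has 8 slots;
--  w[:7] is List.take 7, exact for this nonnegative slice)
def altLoop (n : Int) (idx : Int) (w : List Int) : List Int :=
  if 0 ≤ idx then
    let val := if idx < n - 4 then
        min (n - idx - 4) 4 + PySem.List.pyGetD w 4 0 + PySem.List.pyGetD w 5 0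
          + PySem.List.pyGetD w 6 0 + PySem.List.pyGetD w 7 0
      else 0
    altLoop n (idx - 1) (val :: w.take 7)
  else w
termination_by (idx + 1).toNat
decreasing_by exact pvDecAlt idx (by assumption)

def count_reaper_alt (n : Int) : Int :=
  1 + PySem.List.pyGetD (altLoop n (n - 1) (List.replicate 8 0)) 0 0

-- ===== PRECONDITION & SPEC =====
def Spec_count_reaper (n : Int) (out : Int) : Prop := out = count_reaper_alt n
instance (n : Int) (out : Int) : Decidable (Spec_count_reaper n out) := by unfold Spec_count_reaper; infer_instance

-- ===== CLAIM (what is proved, stated in full; the proofs are below) =====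
def Claim_equal_count_reaper : Prop := ∀ (n : Int), Dom_count_reaper n → Spec_count_reaper n (count_reaper n)

-- ===== LEMMAS AND PROOFS =====

-- decrease fact for reaperSub's termination
theorem pvDecSub (n idx k : Int) (h : idx < n - 4) (hk : 5 ≤ k) :
    (n - (idx + k)).toNat < (n - idx).toNat := by omega

-- the subtree contribution function both programs compute: contribution of the
-- subtree of indices reachable from idx
def reaperSub (n : Int) (idx : Int) : Int :=
  if idx < n - 4 then
    min (n - idx - 4) 4 + reaperSub n (idx + 5) + reaperSub n (idx + 6)
      + reaperSub n (idx + 7) + reaperSub n (idx + 8)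
  else 0
termination_by (n - idx).toNat
decreasing_by
  · exact pvDecSub n idx 5 (by assumption) (by norm_num)
  · exact pvDecSub n idx 6 (by assumption) (by norm_num)
  · exact pvDecSub n idx 7 (by assumption) (by norm_num)
  · exact pvDecSub n idx 8 (by assumption) (by norm_num)

theorem reaperSub_pos (n idx : Int) (h : idx < n - 4) :
    reaperSub n idx = min (n - idx - 4) 4 + reaperSub n (idx + 5) + reaperSub n (idx + 6)
      + reaperSub n (idx + 7) + reaperSub n (idx + 8) := by
  rw [reaperSub]; rw [if_pos h]

theorem reaperSub_zero (n i : Int) (h : n - 4 ≤ i) : reaperSub n i = 0 := by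
  rw [reaperSub]; rw [if_neg (by omega)]

-- the sum over A's child range equals the four explicit children of reaperSub
theorem reaperSub_range (n idx : Int) (h : idx < n - 4) :
    ((PySem.List.pyRange (idx + 5) (min (idx + 9) n) 1).map (reaperSub n)).sum
      = reaperSub n (idx + 5) + reaperSub n (idx + 6) + reaperSub n (idx + 7)
        + reaperSub n (idx + 8) := by
  by_cases h9 : idx + 9 ≤ n
  · have hm : min (idx + 9) n = idx + 9 := by omega
    rw [hm]
    rw [PySem.List.pyRange_one_cons (by omega), PySem.List.pyRange_one_cons (by omega),
        PySem.List.pyRange_one_cons (by omega), PySem.List.pyRange_one_cons (by omega),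
        PySem.List.pyRange_one_eq_nil (by omega)]
    simp only [List.map_cons, List.map_nil, List.sum_cons, List.sum_nil]
    have e1 : idx + 5 + 1 = idx + 6 := by ring
    rw [e1]
    have e2 : idx + 6 + 1 = idx + 7 := by ring
    rw [e2]
    have e3 : idx + 7 + 1 = idx + 8 := by ring
    rw [e3]; ring
  · -- n ≤ idx + 8: every child index is ≥ n - 4, so every term is 0
    have hz : ∀ x ∈ (PySem.List.pyRange (idx + 5) (min (idx + 9) n) 1).map (reaperSub n),
        x = 0 := by
      intro x hx
      rcases List.mem_map.mp hx with ⟨i, hi, rfl⟩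
      rw [PySem.List.mem_pyRange_one] at hi
      exact reaperSub_zero n i (by omega)
    rw [List.sum_eq_zero hz,
        reaperSub_zero n (idx + 5) (by omega), reaperSub_zero n (idx + 6) (by omega),
        reaperSub_zero n (idx + 7) (by omega), reaperSub_zero n (idx + 8) (by omega)]
    ring

-- A's loop adds the subtree contribution of every queued index
theorem reaperLoop_eq (n : Int) (front back : List Int) (total : Int) :
    reaperLoop n front back total
      = total + (front.map (reaperSub n)).sum + (back.map (reaperSub n)).sum := by
  fun_induction reaperLoop n front back total with
  | case1 total idx rest back h ih =>
    rw [ih]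
    simp only [List.map_append, List.sum_append, List.map_cons, List.sum_cons,
      List.map_reverse, List.sum_reverse]
    rw [reaperSub_range n idx h, reaperSub_pos n idx h]
    ring
  | case2 total idx rest back h ih =>
    rw [ih]
    simp only [List.map_cons, List.sum_cons]
    rw [reaperSub_zero n idx (by omega)]
    ring
  | case3 total => simp
  | case4 total b bs ih =>
    rw [ih]
    simp only [List.map_nil, List.sum_nil, List.map_reverse, List.sum_reverse]
    ring

-- the window as B maintains it: dp values at eight consecutive indices
def windowAt (n m : Int) : List Int :=
  [reaperSub n m, reaperSub n (m + 1), reaperSub n (m + 2), reaperSub n (m + 3),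
   reaperSub n (m + 4), reaperSub n (m + 5), reaperSub n (m + 6), reaperSub n (m + 7)]

theorem altLoop_inv (n : Int) (k : Nat) :
    ∀ idx : Int, idx + 1 = (k : Int) →
      altLoop n idx (windowAt n (idx + 1)) = windowAt n 0 := by
  induction k with
  | zero =>
    intro idx hk
    rw [altLoop, if_neg (by omega)]
    have : idx + 1 = 0 := hk
    rw [this]
  | succ k ih =>
    intro idx hk
    have hidx : 0 ≤ idx := by omega
    rw [altLoop, if_pos hidx]
    have hval : (if idx < n - 4 then
        min (n - idx - 4) 4 + PySem.List.pyGetD (windowAt n (idx + 1)) 4 0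
          + PySem.List.pyGetD (windowAt n (idx + 1)) 5 0
          + PySem.List.pyGetD (windowAt n (idx + 1)) 6 0
          + PySem.List.pyGetD (windowAt n (idx + 1)) 7 0
      else 0) = reaperSub n idx := by
      split_ifs with h
      · rw [reaperSub_pos n idx h]
        simp only [windowAt]
        simp [pysem]
        ring_nf
      · rw [reaperSub_zero n idx (by omega)]
    rw [hval]
    show altLoop n (idx - 1) (reaperSub n idx :: List.take 7 (windowAt n (idx + 1))) = windowAt n 0
    have hwin : (reaperSub n idx :: (windowAt n (idx + 1)).take 7) = windowAt n idx := by
      simp only [windowAt, List.take]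
      have e1 : idx + 1 + 1 = idx + 2 := by ring
      have e2 : idx + 1 + 2 = idx + 3 := by ring
      have e3 : idx + 1 + 3 = idx + 4 := by ring
      have e4 : idx + 1 + 4 = idx + 5 := by ring
      have e5 : idx + 1 + 5 = idx + 6 := by ring
      have e6 : idx + 1 + 6 = idx + 7 := by ring
      rw [e1, e2, e3, e4, e5, e6]
    rw [hwin]
    have := ih (idx - 1) (by omega)
    have e : idx - 1 + 1 = idx := by ring
    rw [e] at this
    exact this

theorem windowAt_top (n : Int) : List.replicate 8 (0 : Int) = windowAt n n := by
  simp only [windowAt,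
    reaperSub_zero n n (by omega), reaperSub_zero n (n + 1) (by omega),
    reaperSub_zero n (n + 2) (by omega), reaperSub_zero n (n + 3) (by omega),
    reaperSub_zero n (n + 4) (by omega), reaperSub_zero n (n + 5) (by omega),
    reaperSub_zero n (n + 6) (by omega), reaperSub_zero n (n + 7) (by omega)]
  rfl

theorem alt_eq (n : Int) : count_reaper_alt n = 1 + reaperSub n 0 := by
  unfold count_reaper_alt
  by_cases hn : 0 ≤ n
  · rw [windowAt_top n]
    have hinv := altLoop_inv n (n).toNat (n - 1) (by omega)
    have e : n - 1 + 1 = n := by ring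
    rw [e] at hinv
    rw [hinv]
    simp [windowAt, PySem.List.pyGetD]
  · rw [altLoop, if_neg (by omega)]
    rw [reaperSub_zero n 0 (by omega)]
    simp [PySem.List.pyGetD]

-- ===== VERDICT (by name: the statement is the Claim_ definition above) =====
theorem count_reaper_spec : Claim_equal_count_reaper := by
  intro n _
  unfold Spec_count_reaper
  rw [alt_eq]
  unfold count_reaper
  rw [reaperLoop_eq]
  simp
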